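-- pv_equiv track=rewrite | github.com/xuanminhcvp/short-image-flow | services/debug_report_service.py | get_scene_candidate_video_media_ids
-- ===== SOURCE A (Python) =====
-- def get_scene_candidate_video_media_ids(
--     scene_no: int,
--     scene_to_video_ready_media_ids: dict,
--     scene_to_video_media_ids: dict,
--     scene_to_video_failed_media_ids: dict,
-- ) -> list[str]:
--     """Lấy danh sách mediaId video theo thứ tự READY -> pending -> FAILED."""
--     ready = list(reversed(scene_to_video_ready_media_ids.get(scene_no, []) or []))
--     all_ids = list(reversed(scene_to_video_media_ids.get(scene_no, []) or []))
--     failed = set(scene_to_video_failed_media_ids.get(scene_no, []) or [])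
--
--     ordered = []
--     ordered.extend(ready)
--     ordered.extend([mid for mid in all_ids if mid not in ready and mid not in failed])
--     ordered.extend([mid for mid in all_ids if mid in failed])
--
--     return list(dict.fromkeys([mid for mid in ordered if isinstance(mid, str) and mid]))
-- ===== SOURCE B (Python) =====
-- def get_scene_candidate_video_media_ids(
--     scene_no: int,
--     scene_to_video_ready_media_ids: dict,
--     scene_to_video_media_ids: dict,
--     scene_to_video_failed_media_ids: dict,
-- ) -> list[str]:
--     """READY -> pending -> FAILED via ONE stable sort by a 3-valued priority key, then dedup."""
--     ready = scene_to_video_ready_media_ids.get(scene_no) or []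
--     all_ids = scene_to_video_media_ids.get(scene_no) or []
--     failed = set(scene_to_video_failed_media_ids.get(scene_no) or [])
--     ready_set = set(ready)
--
--     def pri(mid):
--         if mid in ready_set:
--             return 0
--         if mid in failed:
--             return 2
--         return 1
--
--     combined = list(reversed(ready)) + list(reversed(all_ids))
--     ordered = sorted(combined, key=pri)  # stable: keeps relative order inside each priority class
--     return list(dict.fromkeys(mid for mid in ordered if isinstance(mid, str) and mid))
-- ===== Notes on version B (the rewrite author's own statement) =====
-- stated objective: alternative
-- what changed: B replaces A's three explicit extend/comprehension passes by one stable sort of the combined sequence reversed(ready)+reversed(all_ids) under a 3-valued priority key (0 ready, 2 failed, 1 pending), relying on sort stability to preserve the relative order inside each class, followed by the same dict.fromkeys dedup.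
import Mathlib
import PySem

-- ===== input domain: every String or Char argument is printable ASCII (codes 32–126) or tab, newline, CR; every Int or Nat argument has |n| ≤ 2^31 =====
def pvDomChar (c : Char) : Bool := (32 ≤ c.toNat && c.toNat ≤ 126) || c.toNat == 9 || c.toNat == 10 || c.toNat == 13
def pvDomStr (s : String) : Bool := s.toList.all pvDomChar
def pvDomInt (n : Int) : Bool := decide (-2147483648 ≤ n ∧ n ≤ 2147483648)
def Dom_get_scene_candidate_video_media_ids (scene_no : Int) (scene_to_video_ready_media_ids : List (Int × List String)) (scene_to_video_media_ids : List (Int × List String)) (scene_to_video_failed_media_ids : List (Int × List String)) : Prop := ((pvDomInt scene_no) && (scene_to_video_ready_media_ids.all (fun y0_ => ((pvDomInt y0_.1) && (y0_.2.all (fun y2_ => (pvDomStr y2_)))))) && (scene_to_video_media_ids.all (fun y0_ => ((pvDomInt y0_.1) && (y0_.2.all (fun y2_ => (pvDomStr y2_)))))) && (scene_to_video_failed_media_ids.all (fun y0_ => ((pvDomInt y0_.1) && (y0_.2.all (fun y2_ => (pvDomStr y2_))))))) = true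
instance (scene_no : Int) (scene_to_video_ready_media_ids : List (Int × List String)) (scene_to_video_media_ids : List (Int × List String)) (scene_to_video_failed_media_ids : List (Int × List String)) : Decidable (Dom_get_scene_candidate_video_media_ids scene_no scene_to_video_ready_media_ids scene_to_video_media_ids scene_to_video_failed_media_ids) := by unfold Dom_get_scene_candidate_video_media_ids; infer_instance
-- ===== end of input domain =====

-- ===== PORT A =====
-- B replaces A's three explicit extend/comprehension passes by ONE stable sort of the combined
-- sequence under a 3-valued priority key (objective: alternative algorithm, same observable result).
-- Note: '.get(scene_no, []) or []' in A equals Dict.getD (values are lists; 'or []' only guards None,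
-- impossible here), and 'isinstance(mid, str)' is vacuously true at type List String.
def get_scene_candidate_video_media_ids (scene_no : Int) (scene_to_video_ready_media_ids : List (Int × List String)) (scene_to_video_media_ids : List (Int × List String)) (scene_to_video_failed_media_ids : List (Int × List String)) : List String :=
  let ready : List String := ((PySem.Dict.mk scene_to_video_ready_media_ids).getD scene_no []).reverse
  let all_ids : List String := ((PySem.Dict.mk scene_to_video_media_ids).getD scene_no []).reverse
  let failed : PySem.Set String := PySem.Set.ofList ((PySem.Dict.mk scene_to_video_failed_media_ids).getD scene_no [])
  let ordered : List String :=
    (([] : List String) ++ ready)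
      ++ (all_ids.filter (fun mid => !(ready.contains mid) && !(PySem.Set.contains failed mid))
      ++ all_ids.filter (fun mid => PySem.Set.contains failed mid))
  PySem.List.dedup (ordered.filter (fun mid => mid != ""))

-- ===== PORT B =====
-- 'def pri(mid): 0 if mid in ready_set, 2 elif mid in failed, else 1'
def pvPri (ready_set failed : PySem.Set String) (mid : String) : Int :=
  if PySem.Set.contains ready_set mid then 0
  else if PySem.Set.contains failed mid then 2
  else 1

def get_scene_candidate_video_media_ids_alt (scene_no : Int) (scene_to_video_ready_media_ids : List (Int × List String)) (scene_to_video_media_ids : List (Int × List String)) (scene_to_video_failed_media_ids : List (Int × List String)) : List String :=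
  let ready : List String := (PySem.Dict.mk scene_to_video_ready_media_ids).getD scene_no []
  let all_ids : List String := (PySem.Dict.mk scene_to_video_media_ids).getD scene_no []
  let failed : PySem.Set String := PySem.Set.ofList ((PySem.Dict.mk scene_to_video_failed_media_ids).getD scene_no [])
  let ready_set : PySem.Set String := PySem.Set.ofList ready
  let combined : List String := ready.reverse ++ all_ids.reverse
  let ordered : List String := PySem.List.sorted combined (pvPri ready_set failed) false
  PySem.List.dedup (ordered.filter (fun mid => mid != ""))

-- ===== PRECONDITION & SPEC =====
def Spec_get_scene_candidate_video_media_ids (scene_no : Int) (scene_to_video_ready_media_ids : List (Int × List String)) (scene_to_video_media_ids : List (Int × List String)) (scene_to_video_failed_media_ids : List (Int × List String)) (out : List String) : Prop := out = get_scene_candidate_video_media_ids_alt scene_no scene_to_video_ready_media_ids scene_to_video_media_ids scene_to_video_failed_media_ids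
instance (scene_no : Int) (scene_to_video_ready_media_ids : List (Int × List String)) (scene_to_video_media_ids : List (Int × List String)) (scene_to_video_failed_media_ids : List (Int × List String)) (out : List String) : Decidable (Spec_get_scene_candidate_video_media_ids scene_no scene_to_video_ready_media_ids scene_to_video_media_ids scene_to_video_failed_media_ids out) := by unfold Spec_get_scene_candidate_video_media_ids; infer_instance

-- ===== CLAIM (what is proved, stated in full; the proofs are below) =====
def Claim_equal_get_scene_candidate_video_media_ids : Prop := ∀ (scene_no : Int) (scene_to_video_ready_media_ids : List (Int × List String)) (scene_to_video_media_ids : List (Int × List String)) (scene_to_video_failed_media_ids : List (Int × List String)), Dom_get_scene_candidate_video_media_ids scene_no scene_to_video_ready_media_ids scene_to_video_media_ids scene_to_video_failed_media_ids → Spec_get_scene_candidate_video_media_ids scene_no scene_to_video_ready_media_ids scene_to_video_media_ids scene_to_video_failed_media_ids (get_scene_candidate_video_media_ids scene_no scene_to_video_ready_media_ids scene_to_video_media_ids scene_to_video_failed_media_ids)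

-- ===== LEMMAS AND PROOFS =====

theorem contains_true_iff {α : Type} [BEq α] [LawfulBEq α] (s : PySem.Set α) (x : α) :
    PySem.Set.contains s x = true ↔ x ∈ s := by simp [PySem.Set.contains]

theorem insertBy_cons {α : Type} (before : α → α → Bool) (x y : α) (ys : List α) :
    PySem.List.insertBy before x (y :: ys)
      = if before x y = true then x :: y :: ys else y :: PySem.List.insertBy before x ys := rfl

theorem insertBy_append_left {α : Type} (before : α → α → Bool) (x : α) (A R : List α)
    (h : ∀ y ∈ A, before x y = false) :
    PySem.List.insertBy before x (A ++ R) = A ++ PySem.List.insertBy before x R := by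
  induction A with
  | nil => simp
  | cons a t ih =>
    have ha : before x a = false := h a (List.mem_cons_self ..)
    rw [List.cons_append, insertBy_cons, ha, if_neg (by simp), List.cons_append]
    exact congrArg (a :: ·) (ih (fun y hy => h y (List.mem_cons_of_mem a hy)))

theorem insertBy_cons_of_before {α : Type} (before : α → α → Bool) (x y : α) (ys : List α)
    (h : before x y = true) :
    PySem.List.insertBy before x (y :: ys) = x :: y :: ys := by
  rw [insertBy_cons, if_pos h]

-- stable insertion sort under a {0,1,2}-valued key = the three priority buckets in order
theorem bucket_aux {α : Type} (key : α → Int) (L : List α) :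
    ∀ (A B C : List α),
    (∀ x ∈ L, key x = 0 ∨ key x = 1 ∨ key x = 2) →
    (∀ y ∈ A, key y = 0) → (∀ y ∈ B, key y = 1) → (∀ y ∈ C, key y = 2) →
    L.foldl (fun acc x => PySem.List.insertBy (fun a b => decide (key a < key b)) x acc) (A ++ B ++ C)
      = (A ++ L.filter (fun x => key x == 0)) ++ (B ++ L.filter (fun x => key x == 1))
        ++ (C ++ L.filter (fun x => key x == 2)) := by
  induction L with
  | nil => intro A B C _ _ _ _; simp
  | cons x t ih =>
    intro A B C hL hA hB hC
    have hx := hL x (List.mem_cons_self ..)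
    have ht : ∀ y ∈ t, key y = 0 ∨ key y = 1 ∨ key y = 2 :=
      fun y hy => hL y (List.mem_cons_of_mem x hy)
    rcases hx with h0 | h1 | h2
    · have hstep : PySem.List.insertBy (fun a b => decide (key a < key b)) x (A ++ B ++ C)
          = (A ++ [x]) ++ B ++ C := by
        rw [List.append_assoc,
          insertBy_append_left _ _ A (B ++ C)
            (fun y hy => by rw [hA y hy, h0]; simp)]
        cases hbc : B ++ C with
        | nil => simp [hbc, PySem.List.insertBy]
        | cons y ys =>
          have hy : y ∈ B ++ C := by rw [hbc]; exact List.mem_cons_self ..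
          have hky : key y = 1 ∨ key y = 2 := by
            rcases List.mem_append.mp hy with h | h
            · exact Or.inl (hB y h)
            · exact Or.inr (hC y h)
          rw [insertBy_cons_of_before _ _ _ _ (by rcases hky with h | h <;> rw [h, h0] <;> simp)]
          simp [hbc]
      rw [List.foldl_cons, hstep,
        ih (A ++ [x]) B C ht
          (fun y hy => by rcases List.mem_append.mp hy with h | h
                          · exact hA y h
                          · simpa [List.mem_singleton.mp h] using h0) hB hC]
      rw [List.filter_cons, List.filter_cons, List.filter_cons]
      rw [if_pos (by simp [h0]), if_neg (by simp [h0]), if_neg (by simp [h0])]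
      simp
    · have hstep : PySem.List.insertBy (fun a b => decide (key a < key b)) x (A ++ B ++ C)
          = A ++ (B ++ [x]) ++ C := by
        rw [insertBy_append_left _ _ (A ++ B) C
            (fun y hy => by
              rcases List.mem_append.mp hy with h | h
              · rw [hA y h, h1]; simp
              · rw [hB y h, h1]; simp)]
        cases hcc : C with
        | nil => simp [PySem.List.insertBy]
        | cons y ys =>
          have hy : y ∈ C := by rw [hcc]; exact List.mem_cons_self ..
          rw [insertBy_cons_of_before _ _ _ _ (by rw [hC y hy, h1]; simp)]
          simp
      rw [List.foldl_cons, hstep,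
        ih A (B ++ [x]) C ht hA
          (fun y hy => by rcases List.mem_append.mp hy with h | h
                          · exact hB y h
                          · simpa [List.mem_singleton.mp h] using h1) hC]
      rw [List.filter_cons, List.filter_cons, List.filter_cons]
      rw [if_neg (by simp [h1]), if_pos (by simp [h1]), if_neg (by simp [h1])]
      simp
    · have hstep : PySem.List.insertBy (fun a b => decide (key a < key b)) x (A ++ B ++ C)
          = A ++ B ++ (C ++ [x]) := by
        rw [PySem.List.insertBy_of_forall_not_before _ _ _
            (fun y hy => by
              rcases List.mem_append.mp hy with h | h
              · rcases List.mem_append.mp h with h' | h'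
                · rw [hA y h', h2]; simp
                · rw [hB y h', h2]; simp
              · rw [hC y h, h2]; simp)]
        simp
      rw [List.foldl_cons, hstep,
        ih A B (C ++ [x]) ht hA hB
          (fun y hy => by rcases List.mem_append.mp hy with h | h
                          · exact hC y h
                          · simpa [List.mem_singleton.mp h] using h2)]
      rw [List.filter_cons, List.filter_cons, List.filter_cons]
      rw [if_neg (by simp [h2]), if_neg (by simp [h2]), if_pos (by simp [h2])]
      simp
    
theorem sorted_buckets {α : Type} (key : α → Int) (L : List α)
    (hL : ∀ x ∈ L, key x = 0 ∨ key x = 1 ∨ key x = 2) :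
    PySem.List.sorted L key false
      = L.filter (fun x => key x == 0) ++ L.filter (fun x => key x == 1)
        ++ L.filter (fun x => key x == 2) := by
  rw [PySem.List.sorted_eq_foldl_insertBy]
  simpa using bucket_aux key L [] [] [] hL (by simp) (by simp) (by simp)

theorem mem_update {α : Type} [BEq α] [LawfulBEq α] (l : List α) :
    ∀ (s : PySem.Set α) (y : α), y ∈ s → y ∈ PySem.Set.update s l := by
  induction l with
  | nil => intro s y h; simpa [PySem.Set.update] using h
  | cons x t ih =>
    intro s y h
    rw [PySem.Set.update_cons]
    exact ih _ y ((PySem.Set.mem_add s x y).mpr (Or.inl h))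

theorem update_absorb {α : Type} [BEq α] [LawfulBEq α] (l : List α) :
    ∀ (s : PySem.Set α), (∀ y ∈ l, y ∈ s) → PySem.Set.update s l = s := by
  induction l with
  | nil => intro s _; simp [PySem.Set.update]
  | cons x t ih =>
    intro s h
    rw [PySem.Set.update_cons]
    have hx : PySem.Set.add s x = s := by
      unfold PySem.Set.add
      rw [if_pos ((contains_true_iff s x).mpr (h x (List.mem_cons_self ..)))]
    rw [hx]
    exact ih s (fun y hy => h y (List.mem_cons_of_mem x hy))

theorem update_filter_of {α : Type} [BEq α] [LawfulBEq α] (q : α → Bool) (l : List α) :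
    ∀ (s : PySem.Set α), (∀ m ∈ l, q m = false → m ∈ s) →
    PySem.Set.update s (l.filter q) = PySem.Set.update s l := by
  induction l with
  | nil => intro s _; simp
  | cons m t ih =>
    intro s h
    by_cases hq : q m = true
    · rw [List.filter_cons, if_pos hq, PySem.Set.update_cons, PySem.Set.update_cons]
      exact ih (PySem.Set.add s m)
        (fun y hy hqy => (PySem.Set.mem_add s m y).mpr (Or.inl (h y (List.mem_cons_of_mem m hy) hqy)))
    · have hq' : q m = false := by cases hx : q m; rfl; exact absurd hx hq
      have hm : m ∈ s := h m (List.mem_cons_self ..) hq'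
      have hadd : PySem.Set.add s m = s := by
        unfold PySem.Set.add; rw [if_pos ((contains_true_iff s m).mpr hm)]
      rw [List.filter_cons, if_neg (by simp [hq']), PySem.Set.update_cons, hadd]
      exact ih s (fun y hy hqy => h y (List.mem_cons_of_mem m hy) hqy)

-- the three priority buckets, as boolean filters
theorem pri_eq_zero (rs f : PySem.Set String) (x : String) :
    (pvPri rs f x == (0 : Int)) = PySem.Set.contains rs x := by
  unfold pvPri; split_ifs <;> simp_all

theorem pri_eq_one (rs f : PySem.Set String) (x : String) :
    (pvPri rs f x == (1 : Int)) = (!PySem.Set.contains rs x && !PySem.Set.contains f x) := by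
  unfold pvPri; split_ifs <;> simp_all

theorem pri_eq_two (rs f : PySem.Set String) (x : String) :
    (pvPri rs f x == (2 : Int)) = (!PySem.Set.contains rs x && PySem.Set.contains f x) := by
  unfold pvPri; split_ifs <;> simp_all

-- ===== VERDICT (by name: the statement is the Claim_ definition above) =====
theorem get_scene_candidate_video_media_ids_spec : Claim_equal_get_scene_candidate_video_media_ids := by
  intro sn R A F _
  unfold Spec_get_scene_candidate_video_media_ids
  simp only [get_scene_candidate_video_media_ids, get_scene_candidate_video_media_ids_alt]
  set ready : List String := (PySem.Dict.mk R).getD sn [] with hready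
  set all : List String := (PySem.Dict.mk A).getD sn [] with hall
  set f : PySem.Set String := PySem.Set.ofList ((PySem.Dict.mk F).getD sn []) with hf
  set rs : PySem.Set String := PySem.Set.ofList ready with hrs
  -- decompose B's stable sort into the three priority buckets
  rw [sorted_buckets (pvPri rs f) (ready.reverse ++ all.reverse)
      (fun x _ => by unfold pvPri; split_ifs <;> simp)]
  simp only [List.filter_append]
  -- evaluate the buckets on the two halves of the combined list
  have hmemready : ∀ x ∈ ready.reverse, PySem.Set.contains rs x = true :=
    fun x hx => (contains_true_iff rs x).mpr
      ((PySem.Set.mem_ofList ready x).mpr (List.mem_reverse.mp hx))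
  have hb0r : ready.reverse.filter (fun x => pvPri rs f x == (0:Int)) = ready.reverse := by
    apply List.filter_eq_self.mpr
    intro x hx; rw [pri_eq_zero, hmemready x hx]
  have hb1r : ready.reverse.filter (fun x => pvPri rs f x == (1:Int)) = [] := by
    apply List.filter_eq_nil_iff.mpr
    intro x hx; rw [pri_eq_one, hmemready x hx]; simp
  have hb2r : ready.reverse.filter (fun x => pvPri rs f x == (2:Int)) = [] := by
    apply List.filter_eq_nil_iff.mpr
    intro x hx; rw [pri_eq_two, hmemready x hx]; simp
  have hb0a : all.reverse.filter (fun x => pvPri rs f x == (0:Int))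
      = all.reverse.filter (fun x => PySem.Set.contains rs x) :=
    List.filter_congr (fun x _ => by rw [pri_eq_zero])
  have hb1a : all.reverse.filter (fun x => pvPri rs f x == (1:Int))
      = all.reverse.filter (fun x => !PySem.Set.contains rs x && !PySem.Set.contains f x) :=
    List.filter_congr (fun x _ => by rw [pri_eq_one])
  have hb2a : all.reverse.filter (fun x => pvPri rs f x == (2:Int))
      = all.reverse.filter (fun x => !PySem.Set.contains rs x && PySem.Set.contains f x) :=
    List.filter_congr (fun x _ => by rw [pri_eq_two])
  rw [hb0r, hb1r, hb2r, hb0a, hb1a, hb2a]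
  -- A's pending filter tests list membership in ready.reverse = membership in rs
  have hpend : all.reverse.filter (fun mid => !(ready.reverse.contains mid) && !(PySem.Set.contains f mid))
      = all.reverse.filter (fun mid => !PySem.Set.contains rs mid && !PySem.Set.contains f mid) :=
    List.filter_congr (fun x _ => by
      have : ready.reverse.contains x = PySem.Set.contains rs x := by
        rw [Bool.eq_iff_iff, contains_true_iff, hrs]
        simp [PySem.Set.mem_ofList]
      rw [this])
  rw [hpend]
  -- both results are Set.ofList of a filtered concatenation; compare via update
  rw [PySem.List.dedup_eq_ofList, PySem.List.dedup_eq_ofList, ← PySem.Set.update_empty,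
    ← PySem.Set.update_empty]
  simp only [List.nil_append, PySem.Set.update_append, List.filter_nil]
  set S0 : PySem.Set String := (PySem.Set.empty : PySem.Set String).update
    (ready.reverse.filter (fun mid => mid != "")) with hS0
  have hS0mem : ∀ y : String, y ∈ ready → y ≠ "" → y ∈ S0 := by
    intro y hy hne
    rw [hS0, PySem.Set.update_empty]
    exact (PySem.Set.mem_ofList _ y).mpr
      (List.mem_filter.mpr ⟨List.mem_reverse.mpr hy, by simpa using hne⟩)
  -- B's extra ready-bucket occurrences are already in S0
  have habs : S0.update ((all.reverse.filter (fun x => PySem.Set.contains rs x)).filter (fun mid => mid != "")) = S0 := by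
    apply update_absorb
    intro y hy
    have h1 := List.mem_filter.mp hy
    have h2 := List.mem_filter.mp h1.1
    exact hS0mem y ((PySem.Set.mem_ofList ready y).mp ((contains_true_iff rs y).mp h2.2))
      (by simpa using h1.2)
  rw [habs]
  set S1 : PySem.Set String := S0.update
    ((all.reverse.filter (fun mid => !PySem.Set.contains rs mid && !PySem.Set.contains f mid)).filter
      (fun mid => mid != "")) with hS1
  -- A's failed bucket vs B's failed bucket: drop the occurrences already in S0 ⊆ S1
  have hfail : ((all.reverse.filter (fun x => !PySem.Set.contains rs x && PySem.Set.contains f x)).filter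
        (fun mid => mid != ""))
      = ((all.reverse.filter (fun x => PySem.Set.contains f x)).filter
          (fun mid => mid != "")).filter (fun x => !PySem.Set.contains rs x) := by
    simp only [List.filter_filter]
    exact List.filter_congr (fun x _ => by
      cases PySem.Set.contains rs x <;> cases PySem.Set.contains f x <;> cases (x != "") <;> rfl)
  rw [hfail, update_filter_of (fun x => !PySem.Set.contains rs x)
      ((all.reverse.filter (fun x => PySem.Set.contains f x)).filter (fun mid => mid != "")) S1
      (by
        intro m hm hq
        have h1 := List.mem_filter.mp hm
        have hq' : (!PySem.Set.contains rs m) = false := hq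
        have hmrs : m ∈ rs := (contains_true_iff rs m).mp (by
          cases hx : PySem.Set.contains rs m
          · rw [hx] at hq'; simp at hq'
          · rfl)
        rw [hrs] at hmrs
        exact mem_update _ S0 m
          (hS0mem m ((PySem.Set.mem_ofList ready m).mp hmrs) (by simpa using h1.2)))]
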